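-- pv_equiv track=rewrite | github.com/Xziguoxu/tc | train_seq2seq.py | doc_to_seq
-- ===== SOURCE A (Python) =====
-- def doc_to_seq(docs):
--     w2i = {"_PAD": 0, "_GO": 1, "_EOS": 2}
--     i2w = {0: "_PAD", 1: "_GO", 2: "_EOS"}
--     seqs = []
--     for doc in docs:
--         seq = []
--         for w in doc:
--             if w not in w2i:
--                 i2w[len(w2i)] = w
--                 w2i[w] = len(w2i)
--             seq.append(w2i[w])
--         seqs.append(seq)
--     return seqs, w2i, i2w
-- ===== SOURCE B (Python) =====
-- def doc_to_seq(docs):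
--     # Two-pass re-implementation: build the full vocabulary first, then encode.
--     w2i = {"_PAD": 0, "_GO": 1, "_EOS": 2}
--     i2w = {0: "_PAD", 1: "_GO", 2: "_EOS"}
--     for doc in docs:
--         for w in doc:
--             if w not in w2i:
--                 i2w[len(w2i)] = w
--                 w2i[w] = len(w2i)
--     seqs = [[w2i[w] for w in doc] for doc in docs]
--     return seqs, w2i, i2w
-- ===== Notes on version B (the rewrite author's own statement) =====
-- stated objective: alternative
-- what changed: A builds the vocabulary and the encoded sequences in one fused loop; B separates the task into a vocabulary-building pass over all docs followed by a pure encoding pass (a comprehension of lookups), relying on the fact that once a word gets an index it never changes.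
import Mathlib
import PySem

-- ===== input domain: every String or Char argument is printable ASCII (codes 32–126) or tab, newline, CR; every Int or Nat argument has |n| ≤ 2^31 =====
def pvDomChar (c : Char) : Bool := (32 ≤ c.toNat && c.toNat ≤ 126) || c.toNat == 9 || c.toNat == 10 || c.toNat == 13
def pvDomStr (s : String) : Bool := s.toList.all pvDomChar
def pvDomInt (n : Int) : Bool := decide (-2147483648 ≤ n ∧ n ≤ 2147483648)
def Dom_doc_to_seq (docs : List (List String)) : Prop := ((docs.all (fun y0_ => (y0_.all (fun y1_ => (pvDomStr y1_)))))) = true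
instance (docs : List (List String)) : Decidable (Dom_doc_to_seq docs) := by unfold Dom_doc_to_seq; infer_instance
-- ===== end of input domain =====

-- B fills the whole vocabulary in a first pass, then encodes by pure lookups in a second
-- pass; A fuses both into one loop. Proved equal on all inputs.

-- vocabulary state: (w2i, i2w)
def pvVoc : Type := PySem.Dict String Int × PySem.Dict Int String

def pvVoc0 : pvVoc :=
  (PySem.Dict.ofList [("_PAD", (0 : Int)), ("_GO", 1), ("_EOS", 2)],
   PySem.Dict.ofList [((0 : Int), "_PAD"), (1, "_GO"), (2, "_EOS")])

-- ===== PORT A =====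
-- inner-loop body: add w to the vocab if unseen, then append w2i[w] (always present) to seq
def pvA_word (st : List Int × pvVoc) (w : String) : List Int × pvVoc :=
  let v : pvVoc :=
    if st.2.1.contains w then st.2
    else (st.2.1.insert w (st.2.1.size : Int), st.2.2.insert ((st.2.1.size : Int)) w)
  (st.1 ++ [v.1.getD w 0], v)

def pvA_doc (st : List (List Int) × pvVoc) (doc : List String) : List (List Int) × pvVoc :=
  let r := doc.foldl pvA_word ([], st.2)
  (st.1 ++ [r.1], r.2)

def doc_to_seq (docs : List (List String)) : List (List Int) × (List (String × Int)) × (List (Int × String)) :=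
  let r := docs.foldl pvA_doc ([], pvVoc0)
  (r.1, r.2.1.items, r.2.2.items)

-- ===== PORT B =====
def pvB_addWord (v : pvVoc) (w : String) : pvVoc :=
  if v.1.contains w then v
  else (v.1.insert w (v.1.size : Int), v.2.insert ((v.1.size : Int)) w)

def doc_to_seq_alt (docs : List (List String)) : List (List Int) × (List (String × Int)) × (List (Int × String)) :=
  let v := docs.foldl (fun v doc => doc.foldl pvB_addWord v) pvVoc0
  (docs.map (fun doc => doc.map (fun w => v.1.getD w 0)), v.1.items, v.2.items)

-- ===== PRECONDITION & SPEC =====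
def Spec_doc_to_seq (docs : List (List String)) (out : List (List Int) × (List (String × Int)) × (List (Int × String))) : Prop := out = doc_to_seq_alt docs
instance (docs : List (List String)) (out : List (List Int) × (List (String × Int)) × (List (Int × String))) : Decidable (Spec_doc_to_seq docs out) := by unfold Spec_doc_to_seq; infer_instance

-- ===== CLAIM (what is proved, stated in full; the proofs are below) =====
def Claim_equal_doc_to_seq : Prop := ∀ (docs : List (List String)), Dom_doc_to_seq docs → Spec_doc_to_seq docs (doc_to_seq docs)

-- ===== LEMMAS AND PROOFS =====

-- 'e extends d': every word present in d keeps its index (and stays present) in e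
def pvExt (d e : PySem.Dict String Int) : Prop :=
  ∀ w, d.contains w = true → e.contains w = true ∧ e.getD w 0 = d.getD w 0

theorem pvExt_refl (d : PySem.Dict String Int) : pvExt d d := fun _ h => ⟨h, rfl⟩

theorem pvExt_trans {d e f : PySem.Dict String Int} (h1 : pvExt d e) (h2 : pvExt e f) :
    pvExt d f := fun w hw =>
  ⟨(h2 w (h1 w hw).1).1, ((h2 w (h1 w hw).1).2).trans (h1 w hw).2⟩

theorem pvExt_addWord (v : pvVoc) (w : String) : pvExt v.1 (pvB_addWord v w).1 := by
  intro x hx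
  unfold pvB_addWord
  split
  · exact ⟨hx, rfl⟩
  · rename_i hne
    constructor
    · simp [PySem.Dict.contains_insert, hx]
    · have hxw : x ≠ w := by rintro rfl; simp [hx] at hne
      rw [PySem.Dict.getD_insert]
      simp [hxw]

theorem pvExt_foldl_doc (v : pvVoc) (doc : List String) :
    pvExt v.1 (doc.foldl pvB_addWord v).1 := by
  induction doc generalizing v with
  | nil => exact pvExt_refl _
  | cons w doc ih =>
      exact pvExt_trans (pvExt_addWord v w) (by simpa using ih (pvB_addWord v w))

theorem pvContains_addWord (v : pvVoc) (w : String) :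
    (pvB_addWord v w).1.contains w = true := by
  unfold pvB_addWord
  split
  · assumption
  · simp [PySem.Dict.contains_insert_self]

-- A's inner loop = B's vocab fold over the doc, with the seq being lookups in ANY extension vf
theorem pvInner (doc : List String) (v : pvVoc) (seq : List Int)
    (vf : PySem.Dict String Int) (hvf : pvExt (doc.foldl pvB_addWord v).1 vf) :
    doc.foldl pvA_word (seq, v) =
      (seq ++ doc.map (fun w => vf.getD w 0), doc.foldl pvB_addWord v) := by
  induction doc generalizing v seq with
  | nil => simp
  | cons w doc ih =>
      have hfold : ((w :: doc).foldl pvB_addWord v) = doc.foldl pvB_addWord (pvB_addWord v w) := rfl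
      rw [hfold] at hvf
      have hkeep : pvExt (pvB_addWord v w).1 (doc.foldl pvB_addWord (pvB_addWord v w)).1 :=
        pvExt_foldl_doc _ _
      have hw := (pvExt_trans hkeep hvf) w (pvContains_addWord v w)
      calc (w :: doc).foldl pvA_word (seq, v)
          = doc.foldl pvA_word (seq ++ [(pvB_addWord v w).1.getD w 0], pvB_addWord v w) := rfl
        _ = (seq ++ [(pvB_addWord v w).1.getD w 0] ++ doc.map (fun w => vf.getD w 0),
              doc.foldl pvB_addWord (pvB_addWord v w)) := ih _ _ hvf
        _ = (seq ++ (w :: doc).map (fun w => vf.getD w 0), (w :: doc).foldl pvB_addWord v) := by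
              simp [hw.2]

theorem pvExt_foldl_docs (v : pvVoc) (docs : List (List String)) :
    pvExt v.1 (docs.foldl (fun v doc => doc.foldl pvB_addWord v) v).1 := by
  induction docs generalizing v with
  | nil => exact pvExt_refl _
  | cons doc docs ih =>
      exact pvExt_trans (pvExt_foldl_doc v doc) (by simpa using ih (doc.foldl pvB_addWord v))

theorem pvOuter (docs : List (List String)) (v : pvVoc) (seqs : List (List Int))
    (vf : PySem.Dict String Int)
    (hvf : pvExt (docs.foldl (fun v doc => doc.foldl pvB_addWord v) v).1 vf) :
    docs.foldl pvA_doc (seqs, v) =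
      (seqs ++ docs.map (fun doc => doc.map (fun w => vf.getD w 0)),
       docs.foldl (fun v doc => doc.foldl pvB_addWord v) v) := by
  induction docs generalizing v seqs with
  | nil => simp
  | cons doc docs ih =>
      have hfold : ((doc :: docs).foldl (fun v doc => doc.foldl pvB_addWord v) v)
          = docs.foldl (fun v doc => doc.foldl pvB_addWord v) (doc.foldl pvB_addWord v) := rfl
      rw [hfold] at hvf
      have hext : pvExt (doc.foldl pvB_addWord v).1 vf :=
        pvExt_trans (pvExt_foldl_docs (doc.foldl pvB_addWord v) docs) hvf
      calc (doc :: docs).foldl pvA_doc (seqs, v)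
          = docs.foldl pvA_doc (pvA_doc (seqs, v) doc) := rfl
        _ = docs.foldl pvA_doc
              (seqs ++ [doc.map (fun w => vf.getD w 0)], doc.foldl pvB_addWord v) := by
              unfold pvA_doc
              rw [pvInner doc v [] vf hext]
              simp
        _ = (seqs ++ (doc :: docs).map (fun doc => doc.map (fun w => vf.getD w 0)),
              (doc :: docs).foldl (fun v doc => doc.foldl pvB_addWord v) v) := by
              rw [ih _ _ hvf]; simp

-- ===== VERDICT (by name: the statement is the Claim_ definition above) =====
theorem doc_to_seq_spec : Claim_equal_doc_to_seq := by
  intro docs _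
  unfold Spec_doc_to_seq doc_to_seq doc_to_seq_alt
  rw [pvOuter docs pvVoc0 [] _ (pvExt_refl _)]
  simp
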